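-- pv_equiv track=rewrite | github.com/dalisaydavid/A-Machine | parser.py | parse
-- ===== SOURCE A (Python) =====
-- def parse(strin):
--     words = strin.split()
--     state = 0 # 0 = getting verb, 1 = getting obj, 2 = getting iobj
--     verb = ""
--     obj = ""
--     iobj = ""
--     space = ""
--
--     for word in words:
--         if state == 0:
--             verb = word
--             state += 1
--         elif state == 1:
--             if word.lower() == "with":
--                 state += 1
--                 space = ""
--                 continue
--             if word.lower() == "in":
--                 continue
--             obj += space + word
--             space = " "
--         elif state == 2:
--             iobj += space + word
--             space = " "
--
--     return (verb, obj, iobj)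
-- ===== SOURCE B (Python) =====
-- def parse(strin):
--     words = strin.split()
--     if not words:
--         return ("", "", "")
--     verb, rest = words[0], words[1:]
--     cut = next((i for i, w in enumerate(rest) if w.lower() == "with"), None)
--     obj_region = rest if cut is None else rest[:cut]
--     iobj_words = [] if cut is None else rest[cut + 1:]
--     obj = " ".join(w for w in obj_region if w.lower() != "in")
--     iobj = " ".join(iobj_words)
--     return (verb, obj, iobj)
-- ===== Notes on version B (the rewrite author's own statement) =====
-- stated objective: simpler
-- what changed: Replaces A's 3-state machine with mutable verb/obj/iobj/space accumulators by a direct decomposition: split, take the head as verb, find the first 'with' in the tail, filter 'in' out of the object region and ' '.join the two regions.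
import Mathlib
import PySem

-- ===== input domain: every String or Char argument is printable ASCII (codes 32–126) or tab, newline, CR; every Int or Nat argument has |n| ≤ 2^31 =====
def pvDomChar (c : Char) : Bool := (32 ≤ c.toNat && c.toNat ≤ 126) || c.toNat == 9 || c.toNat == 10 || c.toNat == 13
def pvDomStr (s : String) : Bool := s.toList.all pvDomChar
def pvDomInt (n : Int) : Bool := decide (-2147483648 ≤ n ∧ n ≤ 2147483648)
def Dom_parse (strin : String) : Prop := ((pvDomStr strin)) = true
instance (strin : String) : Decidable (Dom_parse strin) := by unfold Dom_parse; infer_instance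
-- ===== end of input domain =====

-- B replaces A's explicit state machine by a split/find/filter/join decomposition (objective: simpler).

-- ===== PORT A =====
-- state, verb, obj, iobj, space; obj/iobj/space kept as List Char (Python str concatenation, exact)
def parseStep (st : Nat × String × List Char × List Char × List Char) (word : String) :
    Nat × String × List Char × List Char × List Char :=
  match st with
  | (state, verb, obj, iobj, space) =>
    if state == 0 then (state + 1, word, obj, iobj, space)
    else if state == 1 then
      if PySem.Str.lower word == "with" then (state + 1, verb, obj, iobj, [])
      else if PySem.Str.lower word == "in" then (state, verb, obj, iobj, space)
      else (state, verb, obj ++ space ++ word.toList, iobj, [' '])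
    else (state, verb, obj, iobj ++ space ++ word.toList, [' '])

def parse (strin : String) : String × String × String :=
  let fin := (PySem.Str.split₀ strin).foldl parseStep (0, "", [], [], [])
  (fin.2.1, String.ofList fin.2.2.1, String.ofList fin.2.2.2.1)

-- ===== PORT B =====
def parse_alt (strin : String) : String × String × String :=
  match PySem.Str.split₀ strin with
  | [] => ("", "", "")
  | verb :: rest =>
    let cut := rest.findIdx? (fun w => PySem.Str.lower w == "with")
    let objRegion := match cut with | none => rest | some i => rest.take i
    let iobjWords := match cut with | none => [] | some i => rest.drop (i + 1)
    (verb,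
     PySem.Str.join " " (objRegion.filter (fun w => PySem.Str.lower w != "in")),
     PySem.Str.join " " iobjWords)

-- ===== PRECONDITION & SPEC =====
def Spec_parse (strin : String) (out : String × String × String) : Prop := out = parse_alt strin
instance (strin : String) (out : String × String × String) : Decidable (Spec_parse strin out) := by unfold Spec_parse; infer_instance

-- ===== CLAIM (what is proved, stated in full; the proofs are below) =====
def Claim_equal_parse : Prop := ∀ (strin : String), Dom_parse strin → Spec_parse strin (parse strin)

-- ===== LEMMAS AND PROOFS =====

-- A's "space-sentinel" join: first word gets the pending separator, later words a single space
def sepJoin (sp : List Char) (ws : List String) : List Char :=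
  match ws with
  | [] => []
  | w :: ws => sp ++ w.toList ++ sepJoin [' '] ws

theorem join_cons_eq (w : String) (ws : List String) :
    PySem.Chars.join [' '] (w.toList :: ws.map String.toList) = w.toList ++ sepJoin [' '] ws := by
  induction ws generalizing w with
  | nil => simp [PySem.Chars.join_singleton, sepJoin]
  | cons v ws ih =>
    rw [List.map_cons, PySem.Chars.join_cons_cons, ih]
    simp [sepJoin]

theorem sepJoin_eq_join (ws : List String) :
    String.ofList (sepJoin [] ws) = PySem.Str.join " " ws := by
  apply String.toList_inj.mp
  cases ws with
  | nil => simp [sepJoin, PySem.Str.toList_join, PySem.Chars.join_nil]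
  | cons w ws =>
    have h : (" " : String).toList = [' '] := by decide
    simp only [PySem.Str.toList_join, List.map_cons, h, join_cons_eq]
    simp [sepJoin]

theorem loop2 (ws : List String) (v : String) (o i sp : List Char) :
    ws.foldl parseStep (2, v, o, i, sp)
      = (2, v, o, i ++ sepJoin sp ws, if ws.isEmpty then sp else [' ']) := by
  induction ws generalizing i sp with
  | nil => simp [sepJoin]
  | cons w ws ih =>
    simp only [List.foldl_cons, parseStep]
    norm_num
    rw [ih]
    simp [sepJoin]

def notIn (w : String) : Bool := PySem.Str.lower w != "in"
def isWith (w : String) : Bool := PySem.Str.lower w == "with"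

theorem loop1 (ws : List String) (v : String) (o sp : List Char) :
    ws.foldl parseStep (1, v, o, [], sp)
      = match ws.findIdx? isWith with
        | none => (1, v, o ++ sepJoin sp (ws.filter notIn), [],
                   if (ws.filter notIn).isEmpty then sp else [' '])
        | some i => (2, v, o ++ sepJoin sp ((ws.take i).filter notIn),
                     sepJoin [] (ws.drop (i + 1)),
                     if (ws.drop (i + 1)).isEmpty then [] else [' ']) := by
  induction ws generalizing o sp with
  | nil => simp [sepJoin]
  | cons w ws ih =>
    rw [List.foldl_cons, List.findIdx?_cons]
    cases hw : isWith w with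
    | true =>
      simp only [parseStep, isWith] at hw ⊢
      rw [hw]
      norm_num
      rw [loop2]
      simp [sepJoin]
    | false =>
      cases hin : notIn w with
      | false =>
        have hin' : (PySem.Str.lower w == "in") = true := by
          simpa [notIn] using hin
        simp only [parseStep, isWith] at hw ⊢
        rw [hw, hin']
        norm_num
        rw [ih]
        cases h : ws.findIdx? isWith with
        | none => simp [hin]
        | some j => simp [hin]
      | true =>
        have hin' : (PySem.Str.lower w == "in") = false := by
          revert hin
          simp [notIn]
        simp only [parseStep, isWith] at hw ⊢
        rw [hw, hin']
        norm_num
        rw [ih]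
        cases h : ws.findIdx? isWith with
        | none => simp [hin, sepJoin]
        | some j => simp [hin, sepJoin]

theorem parse_eq_alt (strin : String) : parse strin = parse_alt strin := by
  unfold parse parse_alt
  cases hs : PySem.Str.split₀ strin with
  | nil => simp
  | cons v rest =>
    rw [List.foldl_cons]
    have h0 : parseStep (0, "", [], [], []) v = (1, v, [], [], []) := by
      simp [parseStep]
    rw [h0, loop1]
    show _ = (v,
        PySem.Str.join " " ((match rest.findIdx? isWith with
          | none => rest | some i => rest.take i).filter notIn),
        PySem.Str.join " " (match rest.findIdx? isWith with
          | none => ([] : List String) | some i => rest.drop (i + 1)))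
    cases h : rest.findIdx? isWith with
    | none =>
      simp only [List.nil_append]
      refine Prod.ext rfl (Prod.ext ?_ ?_) <;> simp [sepJoin_eq_join]
      · have := sepJoin_eq_join ([] : List String)
        simpa [sepJoin] using this.symm
    | some i =>
      simp only [List.nil_append]
      exact Prod.ext rfl (Prod.ext (sepJoin_eq_join _) (sepJoin_eq_join _))

-- ===== VERDICT (by name: the statement is the Claim_ definition above) =====
theorem parse_spec : Claim_equal_parse := by
  intro strin _
  unfold Spec_parse
  exact parse_eq_alt strin
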